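-- pv_equiv track=rewrite | github.com/FitGlue/server | scripts/analyze_go_imports.py | get_pkg_directories
-- ===== SOURCE A (Python) =====
-- from typing import Set, Dict, List
--
-- def get_pkg_directories(pkg_deps: Set[str]) -> Set[str]:
--     """
--     Convert package import paths to directory paths that need to be copied.
--
--     For nested packages like "infrastructure/pubsub", we need to ensure the
--     parent directory structure exists, but we only need to copy the specific
--     subdirectory.
--
--     Returns:
--         Set of directory paths relative to pkg/ that need to be copied
--     """
--     directories = set()
--
--     for dep in pkg_deps:
--         # Add the package directory itself
--         directories.add(dep)
--
--         # For nested packages, we might also need parent files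
--         # e.g., pkg/infrastructure/ might have common files
--         parts = dep.split("/")
--         for i in range(1, len(parts)):
--             parent = "/".join(parts[:i])
--             directories.add(parent)
--
--     return directories
-- ===== SOURCE B (Python) =====
-- def _proper_prefixes(dep):
--     """Proper ancestor directories of dep, shortest first, by recursion on the
--     path structure: split off the head component at the first '/' and prepend
--     it to the tail's ancestors."""
--     head, sep, tail = dep.partition("/")
--     if not sep:
--         return []
--     return [head] + [head + "/" + p for p in _proper_prefixes(tail)]
--
--
-- def get_pkg_directories(pkg_deps):
--     directories = set()
--     for dep in pkg_deps:
--         directories.add(dep)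
--         directories.update(_proper_prefixes(dep))
--     return directories
-- ===== Notes on version B (the rewrite author's own statement) =====
-- stated objective: alternative
-- what changed: B replaces A's split-into-parts plus '/'.join of part slices with a recursive decomposition on the path structure: partition the dep at its first '/' and build each ancestor by prepending the head component to the tail's recursively computed ancestors, so no parts list, no index range and no slice-rejoining is used.
import Mathlib
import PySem

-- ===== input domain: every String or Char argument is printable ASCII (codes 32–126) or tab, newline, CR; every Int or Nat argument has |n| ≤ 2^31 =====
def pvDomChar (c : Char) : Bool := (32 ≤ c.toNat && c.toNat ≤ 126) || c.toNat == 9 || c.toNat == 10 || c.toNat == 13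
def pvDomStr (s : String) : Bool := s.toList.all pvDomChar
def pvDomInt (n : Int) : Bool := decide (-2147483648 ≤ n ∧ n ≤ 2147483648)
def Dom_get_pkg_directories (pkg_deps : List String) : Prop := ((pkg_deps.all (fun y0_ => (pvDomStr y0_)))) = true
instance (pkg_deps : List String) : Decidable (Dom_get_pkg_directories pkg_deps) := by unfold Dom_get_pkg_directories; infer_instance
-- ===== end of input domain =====

-- B computes each dep's ancestor directories by recursion on the path structure (partition at the
-- first '/', prepend the head component to the tail's ancestors), replacing A's split-into-parts
-- plus join of part slices; objective: alternative decomposition.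

-- ===== PORT A =====
def get_pkg_directories (pkg_deps : List String) : List String :=
  pkg_deps.foldl (fun directories dep =>
    let directories := PySem.Set.add directories dep
    let parts := (PySem.Str.split? dep "/").getD []   -- dep.split("/"); sep ≠ "" so never none
    (PySem.List.pyRange 1 (parts.length : Int) 1).foldl
      (fun directories i =>
        PySem.Set.add directories (PySem.Str.join "/" (PySem.List.slice parts none (some i))))
      directories) []

-- ===== PORT B =====
-- dep.partition("/"), exact over List Char: (before first '/', found?, after first '/')
def pyPartitionSlash : List Char → List Char × Bool × List Char
  | [] => ([], false, [])
  | c :: rest =>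
    if c = '/' then ([], true, rest)
    else
      let r := pyPartitionSlash rest
      (c :: r.1, r.2.1, r.2.2)

-- termination measure for the recursion of _proper_prefixes
theorem pyPartitionSlash_tail_lt (cs : List Char) :
    (pyPartitionSlash cs).2.1 = true → (pyPartitionSlash cs).2.2.length < cs.length := by
  induction cs with
  | nil => simp [pyPartitionSlash]
  | cons c rest ih =>
      by_cases hc : c = '/'
      · simp [pyPartitionSlash, hc]
      · simp only [pyPartitionSlash, if_neg hc]
        intro h; exact Nat.lt_succ_of_lt (ih h)

-- _proper_prefixes from Source B, exact over List Char (strings rebuilt once with String.ofList below)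
def properPrefixes (cs : List Char) : List (List Char) :=
  match hp : pyPartitionSlash cs with
  | (_, false, _) => []
  | (head, true, tail) =>
      head :: (properPrefixes tail).map (fun p => head ++ '/' :: p)
termination_by cs.length
decreasing_by
  have h := pyPartitionSlash_tail_lt cs
  rw [hp] at h; exact h rfl

def get_pkg_directories_alt (pkg_deps : List String) : List String :=
  pkg_deps.foldl (fun directories dep =>
    (properPrefixes dep.toList).foldl
      (fun d p => PySem.Set.add d (String.ofList p))
      (PySem.Set.add directories dep)) []

-- ===== PRECONDITION & SPEC =====
def Spec_get_pkg_directories (pkg_deps : List String) (out : List String) : Prop := out = get_pkg_directories_alt pkg_deps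
instance (pkg_deps : List String) (out : List String) : Decidable (Spec_get_pkg_directories pkg_deps out) := by unfold Spec_get_pkg_directories; infer_instance

-- ===== CLAIM (what is proved, stated in full; the proofs are below) =====
def Claim_equal_get_pkg_directories : Prop := ∀ (pkg_deps : List String), Dom_get_pkg_directories pkg_deps → Spec_get_pkg_directories pkg_deps (get_pkg_directories pkg_deps)

-- ===== LEMMAS AND PROOFS =====

-- positions of '/' in a character list, in order
def posSlash : List Char → List Nat
  | [] => []
  | c :: rest => (if c = '/' then [0] else []) ++ (posSlash rest).map (· + 1)

-- structural description of dep.split("/")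
def mySplit : List Char → List (List Char)
  | [] => [[]]
  | c :: rest =>
      if c = '/' then [] :: mySplit rest
      else (c :: (mySplit rest).headI) :: (mySplit rest).tail

theorem mySplit_ne_nil (cs : List Char) : mySplit cs ≠ [] := by
  cases cs with
  | nil => simp [mySplit]
  | cons c rest => simp only [mySplit]; split <;> simp

theorem mySplit_cons (cs : List Char) : mySplit cs = (mySplit cs).headI :: (mySplit cs).tail := by
  cases h : mySplit cs with
  | nil => exact absurd h (mySplit_ne_nil cs)
  | cons a t => simp

theorem go_spec (fuel : Nat) : ∀ (l cur : List Char) (acc : List (List Char)), l.length < fuel →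
    PySem.Chars.splitOn.go ['/'] fuel l cur acc
      = acc.reverse ++ (cur.reverse ++ (mySplit l).headI) :: (mySplit l).tail := by
  induction fuel with
  | zero => intro l cur acc h; omega
  | succ fuel ih =>
      intro l cur acc h
      cases l with
      | nil => simp [PySem.Chars.splitOn.go, mySplit]
      | cons c rest =>
          rw [PySem.Chars.splitOn.go]
          by_cases hc : c = '/'
          · subst hc
            have hpre : List.isPrefixOf ['/'] ('/' :: rest) = true := by simp [List.isPrefixOf]
            rw [if_pos hpre]
            simp only [List.length_cons, List.length_nil] at h ⊢
            rw [ih _ _ _ (by simp at h ⊢; omega)]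
            simp only [List.drop_succ_cons, List.drop_zero]
            rw [mySplit_cons rest]
            simp [mySplit]
            exact (mySplit_cons rest).symm
          · have hpre : List.isPrefixOf ['/'] (c :: rest) = false := by
              simp [List.isPrefixOf]; exact fun hb => hc (by simpa using hb.symm)
            rw [if_neg (by simp [hpre])]
            rw [ih _ _ _ (by simp at h; omega)]
            simp [mySplit, hc]

theorem splitOn_slash (cs : List Char) : PySem.Chars.splitOn cs ['/'] = mySplit cs := by
  have h := go_spec (cs.length + 1) cs [] [] (by omega)
  simp only [List.reverse_nil, List.nil_append] at h
  rw [PySem.Chars.splitOn, h, ← mySplit_cons]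

theorem length_mySplit (cs : List Char) : (mySplit cs).length = (posSlash cs).length + 1 := by
  induction cs with
  | nil => simp [mySplit, posSlash]
  | cons c rest ih =>
      by_cases hc : c = '/'
      · simp [mySplit, posSlash, hc, ih]
      · have hne := mySplit_ne_nil rest
        have hpos : 0 < (mySplit rest).length := List.length_pos_of_ne_nil hne
        simp [mySplit, posSlash, hc, List.length_tail]
        omega

theorem join_cons_head (c : Char) (h : List Char) (xs : List (List Char)) :
    PySem.Chars.join ['/'] ((c :: h) :: xs) = c :: PySem.Chars.join ['/'] (h :: xs) := by
  cases xs with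
  | nil => simp [PySem.Chars.join_singleton]
  | cons q qs => rw [PySem.Chars.join_cons_cons, PySem.Chars.join_cons_cons]; simp

-- the core fact: A's joins of part-prefixes are exactly the prefixes before each '/'
theorem core (cs : List Char) :
    (List.range (posSlash cs).length).map
        (fun k => PySem.Chars.join ['/'] ((mySplit cs).take (k + 1)))
      = (posSlash cs).map (fun p => cs.take p) := by
  induction cs with
  | nil => simp [posSlash]
  | cons c rest ih =>
      by_cases hc : c = '/'
      · subst hc
        cases hP : mySplit rest with
        | nil => exact absurd hP (mySplit_ne_nil rest)
        | cons h t =>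
          simp only [posSlash, mySplit, List.length_map, List.singleton_append,
            List.length_cons, reduceIte]
          rw [List.range_succ_eq_map]
          simp only [List.map_cons, List.map_map, List.take_succ_cons]
          congr 1
          rw [show ((fun p => List.take p ('/' :: rest)) ∘ fun x => x + 1)
                  = (fun x => ('/' : Char) :: x) ∘ (fun p => List.take p rest) from
                funext fun p => by simp]
          conv_rhs => rw [← List.map_map]
          rw [← ih]
          conv_rhs => rw [List.map_map]
          apply List.map_congr_left
          intro k _
          simp only [Function.comp_apply, Nat.succ_eq_add_one]
          rw [hP, List.take_succ_cons, PySem.Chars.join_cons_cons]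
          simp
      · cases hP : mySplit rest with
        | nil => exact absurd hP (mySplit_ne_nil rest)
        | cons h t =>
          simp only [posSlash, mySplit, if_neg hc, List.nil_append, List.length_map, hP,
            List.headI_cons, List.tail_cons]
          rw [List.map_map]
          rw [show ((fun p => List.take p (c :: rest)) ∘ fun x => x + 1)
                  = (fun x => c :: x) ∘ (fun p => List.take p rest) from
                funext fun p => by simp]
          conv_rhs => rw [← List.map_map]
          rw [← ih]
          conv_rhs => rw [List.map_map]
          apply List.map_congr_left
          intro k _
          simp only [Function.comp_apply]
          rw [List.take_succ_cons, join_cons_head, hP, List.take_succ_cons]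

theorem pyRange_one_natCast (m : Nat) :
    PySem.List.pyRange 1 ((m : Int) + 1) 1 = (List.range m).map (fun k => ((k + 1 : Nat) : Int)) := by
  induction m with
  | zero => decide
  | succ m ih =>
      have h1 : ((m + 1 : Nat) : Int) + 1 = ((m : Int) + 1) + 1 := by push_cast; ring
      rw [h1, PySem.List.pyRange_one_succ_right (by omega), ih, List.range_succ]
      push_cast
      simp

theorem parts_eq (dep : String) :
    (PySem.Str.split? dep "/").getD [] = (mySplit dep.toList).map String.ofList := by
  have h := PySem.Str.split?_map dep "/"
  rw [show ("/" : String).toList = ['/'] from rfl, PySem.Chars.split?] at h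
  simp only [List.isEmpty_cons, Bool.false_eq_true, reduceIte] at h
  cases hx : PySem.Str.split? dep "/" with
  | none => rw [hx] at h; simp at h
  | some X =>
      rw [hx] at h
      simp only [Option.map_some, Option.some_inj] at h
      rw [splitOn_slash] at h
      simp only [Option.getD_some]
      calc X = (X.map String.toList).map String.ofList := by
                simp [List.map_map, Function.comp_def, String.ofList_toList]
        _ = (mySplit dep.toList).map String.ofList := by rw [h]

theorem str_join_ofList (Y : List (List Char)) :
    PySem.Str.join "/" (Y.map String.ofList) = String.ofList (PySem.Chars.join ['/'] Y) := by
  rw [← String.ofList_toList (s := PySem.Str.join "/" (Y.map String.ofList))]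
  rw [PySem.Str.toList_join]
  simp [List.map_map, Function.comp_def, String.toList_ofList]

-- unfolding equation for the well-founded properPrefixes
theorem properPrefixes_unfold (cs : List Char) :
    properPrefixes cs = match pyPartitionSlash cs with
      | (_, false, _) => []
      | (head, true, tail) => head :: (properPrefixes tail).map (fun p => head ++ '/' :: p) := by
  rw [properPrefixes]
  rcases hp : pyPartitionSlash cs with ⟨h, s, t⟩
  cases s <;> simp

theorem properPrefixes_slash (rest : List Char) :
    properPrefixes ('/' :: rest) = [] :: (properPrefixes rest).map (fun p => '/' :: p) := by
  rw [properPrefixes_unfold ('/' :: rest)]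
  simp [pyPartitionSlash]

theorem properPrefixes_cons (c : Char) (rest : List Char) (hc : c ≠ '/') :
    properPrefixes (c :: rest) = (properPrefixes rest).map (fun p => c :: p) := by
  rw [properPrefixes_unfold (c :: rest), properPrefixes_unfold rest]
  simp only [pyPartitionSlash, if_neg hc]
  cases hp : pyPartitionSlash rest with
  | mk h st =>
      cases st with
      | mk s t =>
          cases s with
          | false => simp
          | true => simp [List.map_map, Function.comp_def]

-- B's recursive prefixes are exactly the prefixes before each '/'
theorem properPrefixes_eq (cs : List Char) :
    properPrefixes cs = (posSlash cs).map (fun p => cs.take p) := by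
  induction cs with
  | nil => rw [properPrefixes_unfold]; simp [pyPartitionSlash, posSlash]
  | cons c rest ih =>
      by_cases hc : c = '/'
      · subst hc
        rw [properPrefixes_slash, ih]
        simp only [posSlash, reduceIte, List.singleton_append, List.map_cons, List.map_map,
          List.take_zero]
        refine List.cons_eq_cons.mpr ⟨rfl, ?_⟩
        apply List.map_congr_left
        intro p _
        simp [Function.comp_apply, List.take_succ_cons]
      · rw [properPrefixes_cons c rest hc, ih]
        simp only [posSlash, if_neg hc, List.nil_append, List.map_map]
        apply List.map_congr_left
        intro p _
        simp [Function.comp_apply, List.take_succ_cons]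

-- per-dep added strings agree between the two ports
theorem adds_eq (dep : String) :
    (PySem.List.pyRange 1 ((((PySem.Str.split? dep "/").getD []).length : Int)) 1).map
        (fun i => PySem.Str.join "/" (PySem.List.slice ((PySem.Str.split? dep "/").getD []) none (some i)))
      = (properPrefixes dep.toList).map String.ofList := by
  have hlen : ((((PySem.Str.split? dep "/").getD []).length : Int))
      = ((posSlash dep.toList).length : Int) + 1 := by
    rw [parts_eq, List.length_map, length_mySplit]; push_cast; ring
  rw [hlen, pyRange_one_natCast, List.map_map]
  have hL : ∀ k ∈ List.range (posSlash dep.toList).length,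
      ((fun i => PySem.Str.join "/" (PySem.List.slice ((PySem.Str.split? dep "/").getD []) none (some i))) ∘
        (fun k : Nat => ((k + 1 : Nat) : Int))) k
      = String.ofList (PySem.Chars.join ['/'] ((mySplit dep.toList).take (k + 1))) := by
    intro k _
    simp only [Function.comp_apply]
    rw [PySem.List.slice_to_natCast, parts_eq, ← List.map_take, str_join_ofList]
  rw [List.map_congr_left hL]
  rw [show (fun k : Nat => String.ofList (PySem.Chars.join ['/'] ((mySplit dep.toList).take (k + 1))))
        = String.ofList ∘ (fun k : Nat => PySem.Chars.join ['/'] ((mySplit dep.toList).take (k + 1))) from rfl]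
  rw [← List.map_map, core, ← properPrefixes_eq]

-- ===== VERDICT (by name: the statement is the Claim_ definition above) =====
theorem get_pkg_directories_spec : Claim_equal_get_pkg_directories := by
  intro pkg_deps _
  unfold Spec_get_pkg_directories get_pkg_directories get_pkg_directories_alt
  apply PySem.List.foldl_congr_mem
  intro acc dep _
  simp only []
  rw [← List.foldl_map (f := fun i => PySem.Str.join "/" (PySem.List.slice ((PySem.Str.split? dep "/").getD []) none (some i))) (g := PySem.Set.add)]
  rw [adds_eq dep]
  rw [List.foldl_map]
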